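-- pv_equiv track=rewrite | github.com/River-JLab/CASA-BeamBeam | CASA_Beam_Beam_ver.02132021_Stable/CrabKick/function_to_deal_sdds_and_crab_crossing.py | Slice_series_when_interaction
-- ===== SOURCE A (Python) =====
-- def Slice_series_when_interaction(Beam_1_Slice_number, Beam_2_Slice_number, Step_of_interaction):
--     n1 = Beam_1_Slice_number
--     n2 = Beam_2_Slice_number
--     step = Step_of_interaction
--
--     interaction_beam_1_slices = []
--     interaction_beam_2_slices = []
--
--     N1 = step - n1
--     touch_number = min(step, n2 - N1, n1, n2)
--     summation = step - 1
--     add = max(0, N1)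
--
--     i = [n for n in range(0, touch_number)]
--     def interaction(i):
--         show = i + add
--         interaction_beam_1_slices.append(summation - show)
--         interaction_beam_2_slices.append(show)
--     list(map(interaction, i))
--
--     return interaction_beam_1_slices, interaction_beam_2_slices
-- ===== SOURCE B (Python) =====
-- def Slice_series_when_interaction(Beam_1_Slice_number, Beam_2_Slice_number, Step_of_interaction):
--     # Two-pointer walk: a pair (s1, s2) interacts iff s1 + s2 == Step_of_interaction - 1
--     # with 0 <= s1 < Beam_1_Slice_number and 0 <= s2 < Beam_2_Slice_number.
--     # Start at the smallest valid beam-2 index and walk the anti-diagonal until a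
--     # bound is violated; no touch_number / min-chain is ever computed.
--     s2 = max(0, Step_of_interaction - Beam_1_Slice_number)
--     s1 = Step_of_interaction - 1 - s2
--     interaction_beam_1_slices = []
--     interaction_beam_2_slices = []
--     while s1 >= 0 and s2 < Beam_2_Slice_number:
--         interaction_beam_1_slices.append(s1)
--         interaction_beam_2_slices.append(s2)
--         s1 -= 1
--         s2 += 1
--     return interaction_beam_1_slices, interaction_beam_2_slices
-- ===== Notes on version B (the rewrite author's own statement) =====
-- stated objective: alternative
-- what changed: B never computes touch_number or the min/max bound chain: it walks the anti-diagonal s1+s2 = step-1 with two pointers (s1 descending, s2 ascending) from the smallest valid beam-2 index, stopping when s1 < 0 or s2 reaches Beam_2_Slice_number, instead of A's precomputed count plus mapped closure appending to outer lists.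
import Mathlib
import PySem

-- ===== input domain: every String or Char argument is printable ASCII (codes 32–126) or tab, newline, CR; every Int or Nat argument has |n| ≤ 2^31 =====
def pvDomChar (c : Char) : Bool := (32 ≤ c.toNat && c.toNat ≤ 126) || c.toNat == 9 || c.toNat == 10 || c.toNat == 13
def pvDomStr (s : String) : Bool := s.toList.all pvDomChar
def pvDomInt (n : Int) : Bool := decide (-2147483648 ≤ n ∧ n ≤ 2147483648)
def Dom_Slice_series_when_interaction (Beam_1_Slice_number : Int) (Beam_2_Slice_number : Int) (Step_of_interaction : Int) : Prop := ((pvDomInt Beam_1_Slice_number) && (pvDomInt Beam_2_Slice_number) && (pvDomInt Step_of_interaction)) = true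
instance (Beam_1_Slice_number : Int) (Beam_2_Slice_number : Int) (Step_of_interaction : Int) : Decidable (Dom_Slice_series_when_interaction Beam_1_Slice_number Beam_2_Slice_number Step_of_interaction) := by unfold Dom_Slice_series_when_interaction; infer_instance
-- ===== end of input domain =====

-- B replaces A's precomputed touch_number + mapped closure with a two-pointer walk
-- along the anti-diagonal s1 + s2 = step - 1, stopping at the index bounds (objective: alternative).

-- ===== PORT A =====
def Slice_series_when_interaction (Beam_1_Slice_number : Int) (Beam_2_Slice_number : Int) (Step_of_interaction : Int) : List Int × List Int :=
  let n1 := Beam_1_Slice_number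
  let n2 := Beam_2_Slice_number
  let step := Step_of_interaction
  let N1 := step - n1
  -- min(step, n2 - N1, n1, n2), folded left as Python does
  let touch_number := min (min (min step (n2 - N1)) n1) n2
  let summation := step - 1
  let add := max 0 N1
  let i := PySem.List.pyRange 0 touch_number 1
  -- list(map(interaction, i)): each call appends to both lists
  let acc := i.foldl (fun (acc : List Int × List Int) k =>
      let show_ := k + add
      (acc.1 ++ [summation - show_], acc.2 ++ [show_])) ([], [])
  (acc.1, acc.2)

-- ===== PORT B =====
-- B's while loop: append (s1, s2) while s1 ≥ 0 and s2 < n2, then s1 -= 1, s2 += 1.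
def pvWalk (n2 : Int) (s1 : Int) (s2 : Int) : List Int × List Int :=
  if h : 0 ≤ s1 ∧ s2 < n2 then
    let rest := pvWalk n2 (s1 - 1) (s2 + 1)
    (s1 :: rest.1, s2 :: rest.2)
  else ([], [])
termination_by (s1 + 1).toNat
decreasing_by omega

def Slice_series_when_interaction_alt (Beam_1_Slice_number : Int) (Beam_2_Slice_number : Int) (Step_of_interaction : Int) : List Int × List Int :=
  let s2 := max 0 (Step_of_interaction - Beam_1_Slice_number)
  let s1 := Step_of_interaction - 1 - s2
  pvWalk Beam_2_Slice_number s1 s2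

-- ===== PRECONDITION & SPEC =====
def Spec_Slice_series_when_interaction (Beam_1_Slice_number : Int) (Beam_2_Slice_number : Int) (Step_of_interaction : Int) (out : List Int × List Int) : Prop := out = Slice_series_when_interaction_alt Beam_1_Slice_number Beam_2_Slice_number Step_of_interaction
instance (Beam_1_Slice_number : Int) (Beam_2_Slice_number : Int) (Step_of_interaction : Int) (out : List Int × List Int) : Decidable (Spec_Slice_series_when_interaction Beam_1_Slice_number Beam_2_Slice_number Step_of_interaction out) := by unfold Spec_Slice_series_when_interaction; infer_instance

-- ===== CLAIM =====
def Claim_equal_Slice_series_when_interaction : Prop := ∀ (Beam_1_Slice_number : Int) (Beam_2_Slice_number : Int) (Step_of_interaction : Int), Dom_Slice_series_when_interaction Beam_1_Slice_number Beam_2_Slice_number Step_of_interaction → Spec_Slice_series_when_interaction Beam_1_Slice_number Beam_2_Slice_number Step_of_interaction (Slice_series_when_interaction Beam_1_Slice_number Beam_2_Slice_number Step_of_interaction)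

-- ===== LEMMAS AND PROOFS =====
theorem pv_foldl_two_appends (l : List Int) (s a : Int) (xs ys : List Int) :
    l.foldl (fun (acc : List Int × List Int) k =>
      (acc.1 ++ [s - (k + a)], acc.2 ++ [k + a])) (xs, ys)
    = (xs ++ l.map (fun k => s - (k + a)), ys ++ l.map (fun k => k + a)) := by
  induction l generalizing xs ys with
  | nil => simp
  | cons h t ih => simp [List.foldl_cons, ih]

-- pvWalk runs exactly (min (s1+1) (n2-s2)).toNat steps, counting s1 down and s2 up.
theorem pvWalk_eq (n2 : Int) (c : Nat) : ∀ (s1 s2 : Int), c = (min (s1 + 1) (n2 - s2)).toNat →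
    pvWalk n2 s1 s2 = ((List.range c).map (fun k : Nat => s1 - (k : Int)),
                       (List.range c).map (fun k : Nat => s2 + (k : Int))) := by
  induction c with
  | zero =>
    intro s1 s2 hc
    rw [pvWalk]
    rw [dif_neg (by omega)]
    simp
  | succ c ih =>
    intro s1 s2 hc
    rw [pvWalk]
    rw [dif_pos (by omega)]
    rw [ih (s1 - 1) (s2 + 1) (by omega)]
    simp only [List.range_succ_eq_map, List.map_cons, List.map_map, Prod.mk.injEq,
      List.cons.injEq]
    refine ⟨⟨by push_cast; ring, List.map_congr_left fun k _ => ?_⟩,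
            ⟨by push_cast; ring, List.map_congr_left fun k _ => ?_⟩⟩ <;>
    · simp [Function.comp]
      omega

-- ===== VERDICT =====
theorem Slice_series_when_interaction_spec : Claim_equal_Slice_series_when_interaction := by
  intro n1 n2 step _
  unfold Spec_Slice_series_when_interaction
  unfold Slice_series_when_interaction Slice_series_when_interaction_alt
  simp only []
  set t := min (min (min step (n2 - (step - n1))) n1) n2 with ht
  set a := max 0 (step - n1) with ha
  rw [show (fun (acc : List Int × List Int) k =>
        let show_ := k + a
        (acc.1 ++ [step - 1 - show_], acc.2 ++ [show_]))
      = (fun (acc : List Int × List Int) k =>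
        (acc.1 ++ [(step - 1) - (k + a)], acc.2 ++ [k + a])) from rfl]
  rw [pv_foldl_two_appends]
  rw [pvWalk_eq n2 t.toNat (step - 1 - a) a (by omega)]
  simp only [List.nil_append, Prod.mk.injEq, PySem.List.pyRange_one, List.map_map]
  rw [show (t - 0).toNat = t.toNat by omega]
  constructor <;>
  · apply List.map_congr_left
    intro k _
    simp [Function.comp]
    omega
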